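-- pv_equiv track=rewrite | github.com/bytelu/Text-Generator | main.py | biagram_to_markov
-- ===== SOURCE A (Python) =====
-- from collections import Counter
--
-- def biagram_to_markov(biagram):
--     markov_converted = {}
--     for i in range(len(biagram)):
--         markov_converted.setdefault(biagram[i][0], []).append(biagram[i][1])
--     for key in markov_converted:
--         markov_converted[key] = Counter(markov_converted[key])
--     for key in markov_converted:
--         markov_converted[key] = markov_converted[key].most_common()
--     return markov_converted
-- ===== SOURCE B (Python) =====
-- def biagram_to_markov(biagram):
--     # No dicts for counting and no Counter: collect first words in first-seen order,
--     # and for each, scan the bigram list for its successors; distinct successors in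
--     # first-seen order get their multiplicity via list.count, then a stable
--     # count-descending sort reproduces Counter.most_common().
--     firsts = []
--     for a, _ in biagram:
--         if a not in firsts:
--             firsts.append(a)
--     result = {}
--     for a in firsts:
--         vals = [y for x, y in biagram if x == a]
--         uniq = []
--         for v in vals:
--             if v not in uniq:
--                 uniq.append(v)
--         result[a] = sorted([(v, vals.count(v)) for v in uniq],
--                            key=lambda kv: kv[1], reverse=True)
--     return result
-- ===== Notes on version B (the rewrite author's own statement) =====
-- stated objective: alternative
-- what changed: Drops A's dict-of-lists/Counter pipeline entirely: B keeps only plain lists (first-seen key list, per-key successor scan by filtering the input, dedup list + list.count for multiplicities) and one stable count-descending sort per key.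
import Mathlib
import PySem

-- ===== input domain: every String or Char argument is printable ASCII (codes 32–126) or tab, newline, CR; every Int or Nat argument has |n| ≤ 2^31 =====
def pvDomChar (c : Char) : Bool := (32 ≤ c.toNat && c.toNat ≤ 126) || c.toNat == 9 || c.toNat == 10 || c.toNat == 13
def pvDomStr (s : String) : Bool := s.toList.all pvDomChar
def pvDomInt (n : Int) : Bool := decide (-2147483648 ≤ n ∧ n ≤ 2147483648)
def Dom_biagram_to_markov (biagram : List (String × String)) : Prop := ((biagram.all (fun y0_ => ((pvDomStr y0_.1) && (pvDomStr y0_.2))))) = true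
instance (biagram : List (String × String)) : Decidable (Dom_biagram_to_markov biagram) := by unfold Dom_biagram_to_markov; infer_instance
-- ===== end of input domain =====

-- ===== PORT A =====
-- B drops A's dict-of-lists/Counter pipeline: plain lists only (first-seen key list,
-- per-key filter of the input, dedup + list.count) plus the same stable sort; same task,
-- different data structures ("alternative", not faster).
-- A: 'setdefault(k, []).append(v)' is observably d.modify k [] (· ++ [v]) (key created at
-- first occurrence); 'for key in d: d[key] = f(d[key])' rebinds values in insertion order
-- and, the value type changing, is ported as a map over the items list. Counter(vs) is
-- PySem.Dict.counter; most_common() is the stable count-descending sort of its items.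
def biagram_to_markov (biagram : List (String × String)) : List (String × List (String × Int)) :=
  let markov1 : PySem.Dict String (List String) :=
    (PySem.List.pyRange 0 (PySem.List.len biagram)).foldl
      (fun d i =>
        let p := PySem.List.pyGetD biagram i ("", "")
        d.modify p.1 [] (fun vs => vs ++ [p.2]))
      PySem.Dict.empty
  let markov2 : List (String × PySem.Dict String Int) :=
    markov1.items.map (fun p => (p.1, PySem.Dict.counter p.2))
  markov2.map (fun p => (p.1, PySem.List.sorted p.2.items (fun kv => kv.2) true))

-- ===== PORT B =====
-- 'if a not in firsts: firsts.append(a)' is exactly PySem.Set.add; the comprehension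
-- '[y for x, y in biagram if x == a]' is filter-then-map; result is a dict filled with
-- the distinct keys of 'firsts' in order.
def biagram_to_markov_alt (biagram : List (String × String)) : List (String × List (String × Int)) :=
  let firsts : PySem.Set String := biagram.foldl (fun s p => PySem.Set.add s p.1) PySem.Set.empty
  let result : PySem.Dict String (List (String × Int)) :=
    firsts.foldl
      (fun d a =>
        let vals := (biagram.filter (fun p => p.1 == a)).map (fun p => p.2)
        let uniq : PySem.Set String := vals.foldl PySem.Set.add PySem.Set.empty
        d.insert a
          (PySem.List.sorted (uniq.map (fun v => (v, PySem.List.count vals v)))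
            (fun kv => kv.2) true))
      PySem.Dict.empty
  result.items

-- ===== PRECONDITION & SPEC =====
def Spec_biagram_to_markov (biagram : List (String × String)) (out : List (String × List (String × Int))) : Prop := out = biagram_to_markov_alt biagram
instance (biagram : List (String × String)) (out : List (String × List (String × Int))) : Decidable (Spec_biagram_to_markov biagram out) := by unfold Spec_biagram_to_markov; infer_instance

-- ===== CLAIM (what is proved, stated in full; the proofs are below) =====
def Claim_equal_biagram_to_markov : Prop := ∀ (biagram : List (String × String)), Dom_biagram_to_markov biagram → Spec_biagram_to_markov biagram (biagram_to_markov biagram)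

-- ===== LEMMAS AND PROOFS =====

theorem pv_items_group (l : List (String × String)) :
    ((l.foldl (fun d p => d.modify p.1 [] (fun vs => vs ++ [p.2])) (PySem.Dict.empty : PySem.Dict String (List String))).items)
    = (PySem.Set.ofList (l.map (fun p => p.1))).map
        (fun a => (a, (l.filter (fun p => p.1 == a)).map (fun p => p.2))) := by
  set g := l.foldl (fun d p => d.modify p.1 [] (fun vs => vs ++ [p.2])) (PySem.Dict.empty : PySem.Dict String (List String)) with hg
  have hkeys : g.keys = PySem.Set.ofList (l.map (fun p => p.1)) := by
    rw [hg, PySem.Dict.keys_foldl_modify_key]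
    simp [PySem.Dict.keys_empty, PySem.Set.update, PySem.Set.ofList_eq_foldl]
  have hnd : g.keys.Nodup := by
    rw [hkeys]; exact PySem.Set.nodup_ofList _
  rw [PySem.Dict.items_eq_map_keys g hnd [], hkeys]
  apply List.map_congr_left
  intro a _
  have h := PySem.Dict.getD_foldl_modify_append l (PySem.Dict.empty : PySem.Dict String (List String)) a
  simp only [PySem.Dict.getD_empty, List.nil_append] at h
  rw [hg, h]

-- ===== VERDICT (by name: the statement is the Claim_ definition above) =====
theorem biagram_to_markov_spec : Claim_equal_biagram_to_markov := by
  intro biagram _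
  unfold Spec_biagram_to_markov biagram_to_markov biagram_to_markov_alt
  simp only []
  -- A's index loop is a fold over the list itself
  have hrange := PySem.List.foldl_pyRange_pyGetD biagram ("", "")
      (fun d p => d.modify p.1 [] (fun vs => vs ++ [p.2]))
      (PySem.Dict.empty : PySem.Dict String (List String)) (le_refl 0)
  simp only [Int.toNat_zero, List.drop_zero] at hrange
  rw [hrange, pv_items_group]
  -- B's firsts loop is Set.ofList of the first components
  have hfirsts : biagram.foldl (fun s p => PySem.Set.add s p.1) PySem.Set.empty
      = PySem.Set.ofList (biagram.map (fun p => p.1)) := by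
    rw [PySem.Set.ofList_eq_foldl, List.foldl_map]; rfl
  rw [hfirsts]
  -- B's result dict inserts fresh distinct keys, so its items list is a map
  rw [PySem.Dict.items_foldl_insert_fresh
      (PySem.Set.ofList (biagram.map (fun p => p.1))) (fun a => a)
      (fun a => PySem.List.sorted
          ((((biagram.filter (fun p => p.1 == a)).map (fun p => p.2)).foldl PySem.Set.add
              PySem.Set.empty).map
            (fun v => (v, (PySem.List.count ((biagram.filter (fun p => p.1 == a)).map (fun p => p.2)) v : Int))))
          (fun kv => kv.2) true)
      PySem.Dict.empty
      (by intro a _; exact PySem.Dict.contains_empty a)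
      (by simp)]
  have hemp : (PySem.Dict.empty : PySem.Dict String (List (String × Int))).items = [] := rfl
  simp only [hemp, List.nil_append, List.map_map]
  apply List.map_congr_left
  intro a _
  simp only [Function.comp]
  congr 1
  -- inner: Counter(vals).items = dedup(vals) paired with counts
  rw [PySem.Dict.items_counter]
  rw [PySem.Set.ofList_eq_foldl]
  exact congrArg (fun xs => PySem.List.sorted xs (fun kv : String × Int => kv.2) true)
    (List.map_congr_left (fun v _ => by simp [PySem.List.count_eq]))
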